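-- pv_equiv track=rewrite | github.com/NoiserMars/TSGExplorer | tsg_newgen.py | _tristrip_to_triangles
-- ===== SOURCE A (Python) =====
-- def _tristrip_to_triangles(indices):
--     """Convert tristrip index list to triangle list. 0xFFFF = strip restart."""
--     triangles = []
--     strip = []
--     for idx in indices:
--         if idx == 0xFFFF:
--             if len(strip) >= 3:
--                 _emit_strip(strip, triangles)
--             strip = []
--         else:
--             strip.append(idx)
--     if len(strip) >= 3:
--         _emit_strip(strip, triangles)
--     return triangles
--
-- def _emit_strip(strip, out):
--     """Convert a single tristrip to triangles with correct winding."""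
--     flipped = True
--     for i in range(len(strip) - 2):
--         a, b, c = strip[i], strip[i+1], strip[i+2]
--         if a != b and b != c and a != c:  # skip degenerate
--             if flipped:
--                 out.append((c, b, a))
--             else:
--                 out.append((b, c, a))
--         flipped = not flipped
-- ===== SOURCE B (Python) =====
-- def _tristrip_to_triangles(indices):
--     """Convert tristrip index list to triangle list. 0xFFFF = strip restart.
--
--     Single streaming pass: keep only the last two non-sentinel indices and a
--     winding flag; no intermediate strip lists, no second pass."""
--     triangles = []
--     prev2 = None
--     prev1 = None
--     flipped = True
--     for idx in indices:
--         if idx == 0xFFFF: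
--             prev2 = None
--             prev1 = None
--             flipped = True
--         elif prev2 is not None and prev1 is not None:
--             a, b = prev2, prev1
--             if a != b and b != idx and a != idx:
--                 triangles.append((idx, b, a) if flipped else (b, idx, a))
--             flipped = not flipped
--             prev2, prev1 = prev1, idx
--         else:
--             prev2, prev1 = prev1, idx
--     return triangles
-- ===== Notes on version B (the rewrite author's own statement) =====
-- stated objective: simpler
-- what changed: Replaces A's two-phase design (collect each strip into a list, then a separate indexed _emit_strip pass over it) with one streaming pass that keeps only the last two non-sentinel indices and a winding flag, emitting each triangle immediately; no intermediate strip lists and no helper function.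
import Mathlib
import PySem

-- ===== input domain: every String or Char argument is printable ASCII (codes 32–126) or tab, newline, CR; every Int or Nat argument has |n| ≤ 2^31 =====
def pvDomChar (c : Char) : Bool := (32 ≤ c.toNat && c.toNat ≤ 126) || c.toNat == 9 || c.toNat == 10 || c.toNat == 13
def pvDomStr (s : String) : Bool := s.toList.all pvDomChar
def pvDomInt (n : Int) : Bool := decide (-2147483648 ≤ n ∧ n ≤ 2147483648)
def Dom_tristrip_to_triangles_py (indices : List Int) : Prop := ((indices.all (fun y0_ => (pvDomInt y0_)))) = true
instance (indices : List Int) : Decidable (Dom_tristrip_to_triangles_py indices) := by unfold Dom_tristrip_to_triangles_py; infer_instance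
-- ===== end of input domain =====

-- B replaces A's collect-strips-then-emit two-phase design by one streaming pass over the
-- indices keeping only the last two non-sentinel indices and a winding flag (simpler; same O(n)).

-- ===== PORT A =====
-- _emit_strip: the indexed window loop `for i in range(len(strip)-2)` ported as the obvious
-- structural recursion over the strip (the windows strip[i],strip[i+1],strip[i+2] in order),
-- appending to `out` exactly as the Python does; `flipped` toggles every iteration.
def pvEmitStrip (flipped : Bool) (strip : List Int) (out : List (Int × Int × Int)) :
    List (Int × Int × Int) :=
  match strip with
  | a :: b :: c :: rest =>
      pvEmitStrip (!flipped) (b :: c :: rest)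
        (if a ≠ b ∧ b ≠ c ∧ a ≠ c then
           out ++ [if flipped then (c, b, a) else (b, c, a)]
         else out)
  | _ => out

def pvAStep (st : List (Int × Int × Int) × List Int) (idx : Int) :
    List (Int × Int × Int) × List Int :=
  if idx = 65535 then
    (if 3 ≤ st.2.length then pvEmitStrip true st.2 st.1 else st.1, [])
  else
    (st.1, st.2 ++ [idx])

def tristrip_to_triangles_py (indices : List Int) : List (Int × Int × Int) :=
  let st := indices.foldl pvAStep ([], [])
  if 3 ≤ st.2.length then pvEmitStrip true st.2 st.1 else st.1

-- ===== PORT B =====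
-- state: (prev2, prev1, flipped, triangles)
def pvBStep (st : Option Int × Option Int × Bool × List (Int × Int × Int)) (idx : Int) :
    Option Int × Option Int × Bool × List (Int × Int × Int) :=
  if idx = 65535 then
    (none, none, true, st.2.2.2)
  else
    match st.1, st.2.1 with
    | some a, some b =>
        (some b, some idx, !st.2.2.1,
          if a ≠ b ∧ b ≠ idx ∧ a ≠ idx then
            st.2.2.2 ++ [if st.2.2.1 then (idx, b, a) else (b, idx, a)]
          else st.2.2.2)
    | _, _ => (st.2.1, some idx, st.2.2.1, st.2.2.2)

def tristrip_to_triangles_py_alt (indices : List Int) : List (Int × Int × Int) :=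
  (indices.foldl pvBStep (none, none, true, [])).2.2.2

-- ===== PRECONDITION & SPEC =====
def Spec_tristrip_to_triangles_py (indices : List Int) (out : List (Int × Int × Int)) : Prop := out = tristrip_to_triangles_py_alt indices
instance (indices : List Int) (out : List (Int × Int × Int)) : Decidable (Spec_tristrip_to_triangles_py indices out) := by unfold Spec_tristrip_to_triangles_py; infer_instance

-- ===== CLAIM (what is proved, stated in full; the proofs are below) =====
def Claim_equal_tristrip_to_triangles_py : Prop := ∀ (indices : List Int), Dom_tristrip_to_triangles_py indices → Spec_tristrip_to_triangles_py indices (tristrip_to_triangles_py indices)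

-- ===== LEMMAS AND PROOFS =====

-- the winding flag B carries when its current (implicit) strip is s
def pvPf (s : List Int) : Bool := s.length ≤ 1 || s.length % 2 == 0

lemma pvEmitStrip_acc (strip : List Int) :
    ∀ (f : Bool) (out : List (Int × Int × Int)),
      pvEmitStrip f strip out = out ++ pvEmitStrip f strip [] := by
  induction strip with
  | nil => intro f out; simp [pvEmitStrip]
  | cons a t ih =>
    intro f out
    match t with
    | [] => simp [pvEmitStrip]
    | [b] => simp [pvEmitStrip]
    | b :: c :: r =>
      simp only [pvEmitStrip]
      rw [ih, ih (!f) (if a ≠ b ∧ b ≠ c ∧ a ≠ c then [] ++ [if f then (c,b,a) else (b,c,a)] else [])]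
      split_ifs <;> simp

lemma pvEmitStrip_short (f : Bool) (s : List Int) (h : s.length < 3) :
    pvEmitStrip f s [] = [] := by
  match s, h with
  | [], _ => rfl
  | [a], _ => rfl
  | [a, b], _ => rfl

lemma pvEmitStrip_snoc (s : List Int) :
    ∀ (f : Bool) (x : Int),
      pvEmitStrip f (s ++ [x]) [] = pvEmitStrip f s [] ++
        match s.dropLast.getLast?, s.getLast? with
        | some a, some b =>
            if a ≠ b ∧ b ≠ x ∧ a ≠ x then
              [if (if s.length % 2 == 0 then f else !f) then (x, b, a) else (b, x, a)]
            else []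
        | _, _ => [] := by
  induction s with
  | nil => intro f x; simp [pvEmitStrip]
  | cons a t ih =>
    intro f x
    match t with
    | [] => simp [pvEmitStrip]
    | [b] =>
      simp only [pvEmitStrip, List.cons_append, List.nil_append, List.dropLast,
        List.getLast?_cons_cons, List.getLast?_singleton, List.length_cons, List.length_nil]
      norm_num
    | b :: c :: r =>
      have hlen : ((b :: c :: r : List Int).length % 2 == 0) = !((a :: b :: c :: r : List Int).length % 2 == 0) := by
        simp only [List.length_cons]
        rcases Nat.mod_two_eq_zero_or_one r.length with h | h <;> simp [Nat.add_mod, h]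
      have hd2 : ((a :: b :: c :: r : List Int).dropLast.getLast?) = ((b :: c :: r : List Int).dropLast.getLast?) := by
        simp [List.dropLast]
      have hg2 : ((a :: b :: c :: r : List Int).getLast?) = ((b :: c :: r : List Int).getLast?) := by
        simp
      have ih' := ih (!f) x
      simp only [List.cons_append] at ih'
      simp only [List.cons_append, pvEmitStrip]
      rw [pvEmitStrip_acc (b :: c :: (r ++ [x])) (!f), pvEmitStrip_acc (b :: c :: r) (!f)]
      rw [ih', hd2, hg2, hlen]
      clear ih ih'
      cases hb2 : ((a :: b :: c :: r : List Int).length % 2 == 0) <;>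
        simp [List.append_assoc]

-- main invariant: running B from the state induced by A's pending strip s and emitted list ts
lemma pv_loop (ind : List Int) :
    ∀ (ts : List (Int × Int × Int)) (s : List Int),
      (ind.foldl pvBStep (s.dropLast.getLast?, s.getLast?, pvPf s, ts ++ pvEmitStrip true s [])).2.2.2
        = (let st := ind.foldl pvAStep (ts, s);
           if 3 ≤ st.2.length then pvEmitStrip true st.2 st.1 else st.1) := by
  induction ind with
  | nil =>
    intro ts s
    simp only [List.foldl_nil]
    split_ifs with h
    · rw [pvEmitStrip_acc s true ts]
    · rw [pvEmitStrip_short true s (by omega)]; simp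
  | cons idx rest ih =>
    intro ts s
    simp only [List.foldl_cons]
    by_cases hidx : idx = 65535
    · -- sentinel: reset B's window; A flushes the strip
      have hb : pvBStep (s.dropLast.getLast?, s.getLast?, pvPf s, ts ++ pvEmitStrip true s []) idx
          = (none, none, true, ts ++ pvEmitStrip true s []) := by
        simp [pvBStep, hidx]
      have ha : pvAStep (ts, s) idx
          = (if 3 ≤ s.length then pvEmitStrip true s ts else ts, []) := by
        simp [pvAStep, hidx]
      have hts : (if 3 ≤ s.length then pvEmitStrip true s ts else ts)
          = ts ++ pvEmitStrip true s [] := by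
        split_ifs with h
        · rw [pvEmitStrip_acc s true ts]
        · rw [pvEmitStrip_short true s (by omega)]; simp
      rw [hb, ha, hts]
      have h2 := ih (ts ++ pvEmitStrip true s []) []
      simpa [pvPf, pvEmitStrip] using h2
    · -- ordinary index: B slides the window; A appends to the strip
      have ha : pvAStep (ts, s) idx = (ts, s ++ [idx]) := by simp [pvAStep, hidx]
      rw [ha]
      have hkey : pvBStep (s.dropLast.getLast?, s.getLast?, pvPf s, ts ++ pvEmitStrip true s []) idx
          = ((s ++ [idx]).dropLast.getLast?, (s ++ [idx]).getLast?, pvPf (s ++ [idx]),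
             ts ++ pvEmitStrip true (s ++ [idx]) []) := by
        rw [pvEmitStrip_snoc s true idx]
        simp only [pvBStep, hidx]
        match s with
        | [] => simp [pvPf]
        | [a] => simp [pvPf]
        | a :: b :: r =>
          have h1 : ((a :: b :: r : List Int)).dropLast ≠ [] := by
            have hlend : ((a :: b :: r : List Int)).dropLast.length = r.length + 1 := by simp
            intro h; rw [h] at hlend; simp at hlend
          obtain ⟨u, hu⟩ := Option.isSome_iff_exists.mp (List.getLast?_isSome.mpr h1)
          obtain ⟨v, hv⟩ := Option.isSome_iff_exists.mp
            (List.getLast?_isSome.mpr (by simp : (a :: b :: r : List Int) ≠ []))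
          have hd : ((a :: b :: r : List Int) ++ [idx]).dropLast.getLast? = some v := by
            rw [List.dropLast_concat, hv]
          have hg3 : ((a :: b :: r : List Int) ++ [idx]).getLast? = some idx := by
            rw [List.getLast?_concat]
          have hpf2 : pvPf (a :: b :: r) = ((a :: b :: r : List Int).length % 2 == 0) := by
            simp [pvPf]
          have hpf3 : pvPf ((a :: b :: r) ++ [idx]) = !((a :: b :: r : List Int).length % 2 == 0) := by
            simp only [pvPf, List.length_append, List.length_cons, List.length_nil]
            rcases Nat.mod_two_eq_zero_or_one r.length with h | h <;> simp [Nat.add_mod, h]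
          rw [hu, hv, hd, hg3, hpf3, hpf2]
          cases hb2 : ((a :: b :: r : List Int).length % 2 == 0) <;>
            simp_all [List.append_assoc] <;> split_ifs <;> simp
      rw [hkey]
      exact ih ts (s ++ [idx])

-- ===== VERDICT (by name: the statement is the Claim_ definition above) =====
theorem tristrip_to_triangles_py_spec : Claim_equal_tristrip_to_triangles_py := by
  intro indices _
  unfold Spec_tristrip_to_triangles_py tristrip_to_triangles_py tristrip_to_triangles_py_alt
  have := pv_loop indices [] []
  simp only [List.dropLast_nil, List.getLast?_nil, pvPf, List.length_nil] at this
  simpa [pvEmitStrip] using this.symm
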